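-- pv_equiv track=rewrite | github.com/rahulmehta25/Smart-Legal-Contracts | backend/app/ai/explanation_engine.py | _simplify_text
-- ===== SOURCE A (Python) =====
-- def _simplify_text(text: str) -> str:
--     """Simplify legal text."""
--     simplifications = {
--         'notwithstanding': 'despite',
--         'pursuant to': 'according to',
--         'heretofore': 'before',
--         'whereas': 'since'
--     }
--     result = text
--     for complex, simple in simplifications.items():
--         result = result.replace(complex, simple)
--     return result
-- ===== SOURCE B (Python) =====
-- def _simplify_text(text: str) -> str:
--     """Simplify legal text in a single left-to-right pass over the text."""
--     simplifications = {
--         'notwithstanding': 'despite',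
--         'pursuant to': 'according to',
--         'heretofore': 'before',
--         'whereas': 'since'
--     }
--     parts = []
--     i = 0
--     n = len(text)
--     while i < n:
--         for complex, simple in simplifications.items():
--             if text.startswith(complex, i):
--                 parts.append(simple)
--                 i += len(complex)
--                 break
--         else:
--             parts.append(text[i])
--             i += 1
--     return ''.join(parts)
-- ===== Notes on version B (the rewrite author's own statement) =====
-- stated objective: alternative
-- what changed: Replaces four sequential str.replace passes over the whole text with one left-to-right scan that matches all four phrases at each position and emits the replacement or the character.
import Mathlib
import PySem

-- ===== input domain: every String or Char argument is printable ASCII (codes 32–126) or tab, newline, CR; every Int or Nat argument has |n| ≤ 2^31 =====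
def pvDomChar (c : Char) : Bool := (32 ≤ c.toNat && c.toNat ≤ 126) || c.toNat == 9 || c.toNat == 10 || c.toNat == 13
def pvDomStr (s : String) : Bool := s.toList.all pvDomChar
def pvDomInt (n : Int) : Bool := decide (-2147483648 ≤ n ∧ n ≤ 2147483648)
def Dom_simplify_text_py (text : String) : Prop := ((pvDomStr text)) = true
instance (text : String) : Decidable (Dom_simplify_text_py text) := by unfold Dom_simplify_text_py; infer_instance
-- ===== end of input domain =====

-- B replaces A's four sequential full-text `str.replace` passes by ONE left-to-right scan that,
-- at each position, matches the four phrases and emits either a replacement or the character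
-- (objective: alternative single-pass structure; same return value).

-- ===== PORT A =====
def simplify_text_py (text : String) : String :=
  let result := text
  let result := PySem.Str.replace result "notwithstanding" "despite"
  let result := PySem.Str.replace result "pursuant to" "according to"
  let result := PySem.Str.replace result "heretofore" "before"
  let result := PySem.Str.replace result "whereas" "since"
  result

-- ===== PORT B =====
-- B's while-loop over the running index i, transcribed as recursion on the suffix text[i:];
-- `text.startswith(k, i)` is `isPrefixOf` on the suffix, `i += len(k)` is `drop len(k)`.
def pvScan : List Char → List Char
  | [] => []
  | c :: t =>
    if ("notwithstanding".toList).isPrefixOf (c :: t) then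
      "despite".toList ++ pvScan (List.drop 15 (c :: t))
    else if ("pursuant to".toList).isPrefixOf (c :: t) then
      "according to".toList ++ pvScan (List.drop 11 (c :: t))
    else if ("heretofore".toList).isPrefixOf (c :: t) then
      "before".toList ++ pvScan (List.drop 10 (c :: t))
    else if ("whereas".toList).isPrefixOf (c :: t) then
      "since".toList ++ pvScan (List.drop 7 (c :: t))
    else c :: pvScan t
termination_by cs => cs.length
decreasing_by all_goals simp

def simplify_text_py_alt (text : String) : String :=
  String.ofList (pvScan text.toList)

-- ===== PRECONDITION & SPEC =====
def Spec_simplify_text_py (text : String) (out : String) : Prop := out = simplify_text_py_alt text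
instance (text : String) (out : String) : Decidable (Spec_simplify_text_py text out) := by unfold Spec_simplify_text_py; infer_instance

-- ===== CLAIM (what is proved, stated in full; the proofs are below) =====
def Claim_equal_simplify_text_py : Prop := ∀ (text : String), Dom_simplify_text_py text → Spec_simplify_text_py text (simplify_text_py text)

-- ===== LEMMAS AND PROOFS =====

-- `replace.go` with the accumulator fuel-normalised: pvRep is Chars.replace for a nonempty needle.
def pvRep (old new l : List Char) : List Char :=
  PySem.Chars.replace.go old new l.length l []

-- Equation lemmas for PySem.Chars.replace.go (definitional).
theorem pv_go_zero (old new l acc : List Char) :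
    PySem.Chars.replace.go old new 0 l acc = acc.reverse ++ l := rfl

theorem pv_go_nil (old new acc : List Char) (f : Nat) :
    PySem.Chars.replace.go old new (f+1) [] acc = acc.reverse := rfl

theorem pv_go_cons (old new t acc : List Char) (c : Char) (f : Nat) :
    PySem.Chars.replace.go old new (f+1) (c::t) acc =
      (if old.isPrefixOf (c::t) then
        PySem.Chars.replace.go old new f (List.drop old.length (c::t)) (new.reverse ++ acc)
       else PySem.Chars.replace.go old new f t (c :: acc)) := rfl

theorem pv_go_acc (old new : List Char) :
    ∀ (f : Nat) (l acc : List Char),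
      PySem.Chars.replace.go old new f l acc = acc.reverse ++ PySem.Chars.replace.go old new f l [] := by
  intro f
  induction f with
  | zero => intro l acc; simp [pv_go_zero]
  | succ f ih =>
    intro l acc
    cases l with
    | nil => simp [pv_go_nil]
    | cons c t =>
      rw [pv_go_cons, pv_go_cons]
      by_cases h : old.isPrefixOf (c::t) = true
      · simp only [h, if_true]
        rw [ih (List.drop old.length (c::t)) (new.reverse ++ acc),
            ih (List.drop old.length (c::t)) (new.reverse ++ [])]
        simp
      · simp only [h, Bool.false_eq_true, if_false]
        rw [ih t (c :: acc), ih t [c]]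
        simp

theorem pv_go_fuel (old new : List Char) (hold : old ≠ []) :
    ∀ (f g : Nat) (l : List Char), l.length ≤ f → l.length ≤ g →
      PySem.Chars.replace.go old new f l [] = PySem.Chars.replace.go old new g l [] := by
  intro f
  induction f with
  | zero =>
    intro g l hf _
    have hl : l = [] := by cases l <;> simp_all
    subst hl
    cases g with
    | zero => rfl
    | succ g => rfl
  | succ f ih =>
    intro g l hf hg
    cases g with
    | zero =>
      have hl : l = [] := by cases l <;> simp_all
      subst hl; rfl
    | succ g =>
      cases l with
      | nil => rfl
      | cons c t =>
        rw [pv_go_cons, pv_go_cons]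
        have hlen : 1 ≤ old.length := by cases old <;> simp_all
        by_cases h : old.isPrefixOf (c::t) = true
        · simp only [h, if_true]
          rw [pv_go_acc old new f, pv_go_acc old new g]
          have hd : (List.drop old.length (c::t)).length ≤ f := by
            simp at hf ⊢; omega
          have hd' : (List.drop old.length (c::t)).length ≤ g := by
            simp at hg ⊢; omega
          rw [ih g (List.drop old.length (c::t)) hd hd']
        · simp only [h, Bool.false_eq_true, if_false]
          rw [pv_go_acc old new f, pv_go_acc old new g]
          have ht : t.length ≤ f := by simp at hf; omega
          have ht' : t.length ≤ g := by simp at hg; omega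
          rw [ih g t ht ht']

theorem pv_replace_eq_pvRep (l old new : List Char) (h : old ≠ []) :
    PySem.Chars.replace l old new = pvRep old new l := by
  rw [PySem.Chars.replace, pvRep]
  simp [List.isEmpty_iff, h]

-- The three defining equations of pvRep, for a nonempty needle.
theorem pvRep_nil (old new : List Char) : pvRep old new [] = [] := rfl

theorem pvRep_pos (old new l : List Char) (hold : old ≠ []) (h : old <+: l) :
    pvRep old new l = new ++ pvRep old new (List.drop old.length l) := by
  cases l with
  | nil =>
    exact absurd (List.prefix_nil.mp h) hold
  | cons c t =>
    have hb : old.isPrefixOf (c::t) = true := List.isPrefixOf_iff_prefix.mpr h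
    rw [pvRep, show (c::t).length = t.length + 1 from rfl, pv_go_cons]
    simp only [hb, if_true]
    rw [pv_go_acc]
    have hlen : 1 ≤ old.length := by cases old <;> simp_all
    have hd : (List.drop old.length (c::t)).length ≤ t.length := by simp; omega
    rw [pv_go_fuel old new hold t.length (List.drop old.length (c::t)).length _ hd le_rfl]
    simp [pvRep]

theorem pvRep_neg (old new t : List Char) (c : Char) (h : ¬ old <+: (c::t)) :
    pvRep old new (c::t) = c :: pvRep old new t := by
  have hb : old.isPrefixOf (c::t) = false := by
    rw [← Bool.not_eq_true, List.isPrefixOf_iff_prefix]; exact h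
  rw [pvRep, show (c::t).length = t.length + 1 from rfl, pv_go_cons]
  simp only [hb, Bool.false_eq_true, if_false]
  rw [pv_go_acc]
  rfl

-- s and u are "incomparable at every offset": no nonempty suffix of s is prefix-comparable with u.
abbrev pvIncomp (s u : List Char) : Prop :=
  ∀ t ∈ s.tails, t ≠ [] → ¬ t <+: u ∧ ¬ u <+: t

theorem pvIncomp_tail {s u : List Char} {c : Char} (h : pvIncomp (c::s) u) : pvIncomp s u := by
  intro t ht
  exact h t (by rw [List.tails_cons]; exact List.mem_cons_of_mem _ ht)

-- If no occurrence of `old` can start inside `s` (pvIncomp s old), replacement commutes past s.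
theorem pv_commute (old new s : List Char) (hinc : pvIncomp s old) :
    ∀ cs, pvRep old new (s ++ cs) = s ++ pvRep old new cs := by
  induction s with
  | nil => intro cs; simp
  | cons c s' ih =>
    intro cs
    have hnp : ¬ old <+: (c :: (s' ++ cs)) := by
      intro hpre
      have hcomp := List.prefix_or_prefix_of_prefix hpre
        (List.prefix_append (c::s') cs)
      have hcs := hinc (c::s') (by rw [List.tails_cons]; exact List.mem_cons_self) (by simp)
      rcases hcomp with h1 | h1
      · exact hcs.2 h1
      · exact hcs.1 h1
    rw [List.cons_append, pvRep_neg old new _ c hnp, ih (pvIncomp_tail hinc) cs]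
    rfl

-- If w is incomparable with the replacement text at every offset, replacing cannot create
-- a new occurrence of w at the front.
theorem pv_noPref (old new : List Char) (hold : old ≠ []) :
    ∀ (n : Nat) (w t : List Char), t.length ≤ n → pvIncomp w new →
      ¬ w <+: t → ¬ w <+: pvRep old new t := by
  intro n
  induction n with
  | zero =>
    intro w t ht _ hw
    have hl : t = [] := by cases t <;> simp_all
    subst hl
    simpa [pvRep_nil] using hw
  | succ n ih =>
    intro w t ht hinc hw
    have hwne : w ≠ [] := by
      intro he; subst he; exact hw (List.nil_prefix)
    by_cases hp : old <+: t
    · rw [pvRep_pos old new t hold hp]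
      intro hpre
      have hcomp := List.prefix_or_prefix_of_prefix hpre (List.prefix_append new _)
      have hcs := hinc w (by simp [List.mem_tails]) hwne
      rcases hcomp with h1 | h1
      · exact hcs.1 h1
      · exact hcs.2 h1
    · cases t with
      | nil => simpa [pvRep_nil] using hw
      | cons c t' =>
        rw [pvRep_neg old new t' c hp]
        cases w with
        | nil => exact absurd rfl hwne
        | cons d w' =>
          intro hpre
          rw [List.cons_prefix_cons] at hpre
          obtain ⟨hd, hw'⟩ := hpre
          subst hd
          have hnw' : ¬ w' <+: t' := by
            intro hx; exact hw (List.cons_prefix_cons.mpr ⟨rfl, hx⟩)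
          exact ih w' t' (by simp at ht; omega) (pvIncomp_tail hinc) hnw' hw'

-- Push "no occurrence of d::w at this position" through one replacement pass.
theorem pv_consNoPref (old new w t : List Char) (d c : Char) (hold : old ≠ [])
    (hinc : pvIncomp w new) (hk : ¬ (d::w) <+: (c::t)) :
    ¬ (d::w) <+: (c :: pvRep old new t) := by
  intro hpre
  rw [List.cons_prefix_cons] at hpre
  obtain ⟨hd, hw⟩ := hpre
  subst hd
  have hnw : ¬ w <+: t := fun hx => hk (List.cons_prefix_cons.mpr ⟨rfl, hx⟩)
  exact pv_noPref old new hold t.length w t le_rfl hinc hnw hw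

-- Branch-unfolding lemmas for pvScan (Prop-level conditions).
theorem pvScan_nil : pvScan [] = [] := by simp [pvScan]

theorem pvScan_pos1 (cs : List Char)
    (h1 : "notwithstanding".toList <+: cs) :
    pvScan cs = "despite".toList ++ pvScan (List.drop 15 cs) := by
  cases cs with
  | nil => exact absurd (List.prefix_nil.mp h1) (by decide)
  | cons c t =>
    have b1 : ("notwithstanding".toList).isPrefixOf (c::t) = true := List.isPrefixOf_iff_prefix.mpr h1
    rw [pvScan]
    simp only [b1, if_true]

theorem pvScan_pos2 (cs : List Char) (h1 : ¬ "notwithstanding".toList <+: cs)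
    (h2 : "pursuant to".toList <+: cs) :
    pvScan cs = "according to".toList ++ pvScan (List.drop 11 cs) := by
  cases cs with
  | nil => exact absurd (List.prefix_nil.mp h2) (by decide)
  | cons c t =>
    have b1 : ("notwithstanding".toList).isPrefixOf (c::t) = false := by
      rw [← Bool.not_eq_true, List.isPrefixOf_iff_prefix]; exact h1
    have b2 : ("pursuant to".toList).isPrefixOf (c::t) = true := List.isPrefixOf_iff_prefix.mpr h2
    rw [pvScan]
    simp only [b1, b2, Bool.false_eq_true, if_false, if_true]

theorem pvScan_pos3 (cs : List Char) (h1 : ¬ "notwithstanding".toList <+: cs) (h2 : ¬ "pursuant to".toList <+: cs)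
    (h3 : "heretofore".toList <+: cs) :
    pvScan cs = "before".toList ++ pvScan (List.drop 10 cs) := by
  cases cs with
  | nil => exact absurd (List.prefix_nil.mp h3) (by decide)
  | cons c t =>
    have b1 : ("notwithstanding".toList).isPrefixOf (c::t) = false := by
      rw [← Bool.not_eq_true, List.isPrefixOf_iff_prefix]; exact h1
    have b2 : ("pursuant to".toList).isPrefixOf (c::t) = false := by
      rw [← Bool.not_eq_true, List.isPrefixOf_iff_prefix]; exact h2
    have b3 : ("heretofore".toList).isPrefixOf (c::t) = true := List.isPrefixOf_iff_prefix.mpr h3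
    rw [pvScan]
    simp only [b1, b2, b3, Bool.false_eq_true, if_false, if_true]

theorem pvScan_pos4 (cs : List Char) (h1 : ¬ "notwithstanding".toList <+: cs) (h2 : ¬ "pursuant to".toList <+: cs) (h3 : ¬ "heretofore".toList <+: cs)
    (h4 : "whereas".toList <+: cs) :
    pvScan cs = "since".toList ++ pvScan (List.drop 7 cs) := by
  cases cs with
  | nil => exact absurd (List.prefix_nil.mp h4) (by decide)
  | cons c t =>
    have b1 : ("notwithstanding".toList).isPrefixOf (c::t) = false := by
      rw [← Bool.not_eq_true, List.isPrefixOf_iff_prefix]; exact h1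
    have b2 : ("pursuant to".toList).isPrefixOf (c::t) = false := by
      rw [← Bool.not_eq_true, List.isPrefixOf_iff_prefix]; exact h2
    have b3 : ("heretofore".toList).isPrefixOf (c::t) = false := by
      rw [← Bool.not_eq_true, List.isPrefixOf_iff_prefix]; exact h3
    have b4 : ("whereas".toList).isPrefixOf (c::t) = true := List.isPrefixOf_iff_prefix.mpr h4
    rw [pvScan]
    simp only [b1, b2, b3, b4, Bool.false_eq_true, if_false, if_true]

theorem pvScan_neg (t : List Char) (c : Char) (h1 : ¬ "notwithstanding".toList <+: (c::t))
    (h2 : ¬ "pursuant to".toList <+: (c::t)) (h3 : ¬ "heretofore".toList <+: (c::t))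
    (h4 : ¬ "whereas".toList <+: (c::t)) :
    pvScan (c::t) = c :: pvScan t := by
  have b1 : ("notwithstanding".toList).isPrefixOf (c::t) = false := by
    rw [← Bool.not_eq_true, List.isPrefixOf_iff_prefix]; exact h1
  have b2 : ("pursuant to".toList).isPrefixOf (c::t) = false := by
    rw [← Bool.not_eq_true, List.isPrefixOf_iff_prefix]; exact h2
  have b3 : ("heretofore".toList).isPrefixOf (c::t) = false := by
    rw [← Bool.not_eq_true, List.isPrefixOf_iff_prefix]; exact h3
  have b4 : ("whereas".toList).isPrefixOf (c::t) = false := by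
    rw [← Bool.not_eq_true, List.isPrefixOf_iff_prefix]; exact h4
  rw [pvScan]
  simp only [b1, b2, b3, b4, Bool.false_eq_true, if_false]

-- The heart of the proof: four sequential replacement passes equal the single scan.
theorem pv_main : ∀ (n : Nat) (cs : List Char), cs.length ≤ n →
    pvRep "whereas".toList "since".toList
      (pvRep "heretofore".toList "before".toList
        (pvRep "pursuant to".toList "according to".toList
          (pvRep "notwithstanding".toList "despite".toList cs))) = pvScan cs := by
  intro n
  induction n with
  | zero =>
    intro cs h
    have hl : cs = [] := by cases cs <;> simp_all
    subst hl
    simp [pvRep_nil, pvScan_nil]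
  | succ n ih =>
    intro cs h
    by_cases h1 : "notwithstanding".toList <+: cs
    · rw [pvScan_pos1 cs h1]
      obtain ⟨r, rfl⟩ := h1
      have hlen : ("notwithstanding".toList).length = 15 := by decide
      rw [pvRep_pos "notwithstanding".toList "despite".toList _ (by decide) (List.prefix_append _ _)]
      rw [hlen]
      simp only [List.drop_left' hlen]
      rw [pv_commute "pursuant to".toList "according to".toList "despite".toList (by decide)]
      rw [pv_commute "heretofore".toList "before".toList "despite".toList (by decide)]
      rw [pv_commute "whereas".toList "since".toList "despite".toList (by decide)]
      have hr : r.length ≤ n := by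
        rw [List.length_append, hlen] at h; omega
      rw [ih r hr]
    · by_cases h2 : "pursuant to".toList <+: cs
      · rw [pvScan_pos2 cs h1 h2]
        obtain ⟨r, rfl⟩ := h2
        have hlen : ("pursuant to".toList).length = 11 := by decide
        rw [pv_commute "notwithstanding".toList "despite".toList "pursuant to".toList (by decide)]
        rw [pvRep_pos "pursuant to".toList "according to".toList _ (by decide) (List.prefix_append _ _)]
        rw [hlen]
        simp only [List.drop_left' hlen]
        rw [pv_commute "heretofore".toList "before".toList "according to".toList (by decide)]
        rw [pv_commute "whereas".toList "since".toList "according to".toList (by decide)]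
        have hr : r.length ≤ n := by
          rw [List.length_append, hlen] at h; omega
        rw [ih r hr]
      · by_cases h3 : "heretofore".toList <+: cs
        · rw [pvScan_pos3 cs h1 h2 h3]
          obtain ⟨r, rfl⟩ := h3
          have hlen : ("heretofore".toList).length = 10 := by decide
          rw [pv_commute "notwithstanding".toList "despite".toList "heretofore".toList (by decide)]
          rw [pv_commute "pursuant to".toList "according to".toList "heretofore".toList (by decide)]
          rw [pvRep_pos "heretofore".toList "before".toList _ (by decide) (List.prefix_append _ _)]
          rw [hlen]
          simp only [List.drop_left' hlen]
          rw [pv_commute "whereas".toList "since".toList "before".toList (by decide)]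
          have hr : r.length ≤ n := by
            rw [List.length_append, hlen] at h; omega
          rw [ih r hr]
        · by_cases h4 : "whereas".toList <+: cs
          · rw [pvScan_pos4 cs h1 h2 h3 h4]
            obtain ⟨r, rfl⟩ := h4
            have hlen : ("whereas".toList).length = 7 := by decide
            rw [pv_commute "notwithstanding".toList "despite".toList "whereas".toList (by decide)]
            rw [pv_commute "pursuant to".toList "according to".toList "whereas".toList (by decide)]
            rw [pv_commute "heretofore".toList "before".toList "whereas".toList (by decide)]
            rw [pvRep_pos "whereas".toList "since".toList _ (by decide) (List.prefix_append _ _)]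
            rw [hlen]
            simp only [List.drop_left' hlen]
            have hr : r.length ≤ n := by
              rw [List.length_append, hlen] at h; omega
            rw [ih r hr]
          · cases cs with
            | nil => simp [pvRep_nil, pvScan_nil]
            | cons c t =>
              rw [pvScan_neg t c h1 h2 h3 h4]
              rw [pvRep_neg _ _ _ _ h1]
              have hn2 : ¬ ('p' :: "ursuant to".toList) <+:
                  (c :: pvRep "notwithstanding".toList "despite".toList t) :=
                pv_consNoPref "notwithstanding".toList "despite".toList "ursuant to".toList t 'p' c
                  (by decide) (by decide) h2
              rw [pvRep_neg "pursuant to".toList "according to".toList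
                    (pvRep "notwithstanding".toList "despite".toList t) c hn2]
              have hn3a : ¬ ('h' :: "eretofore".toList) <+:
                  (c :: pvRep "notwithstanding".toList "despite".toList t) :=
                pv_consNoPref "notwithstanding".toList "despite".toList "eretofore".toList t 'h' c
                  (by decide) (by decide) h3
              have hn3 : ¬ ('h' :: "eretofore".toList) <+:
                  (c :: pvRep "pursuant to".toList "according to".toList
                        (pvRep "notwithstanding".toList "despite".toList t)) :=
                pv_consNoPref "pursuant to".toList "according to".toList "eretofore".toList _ 'h' c
                  (by decide) (by decide) hn3a
              rw [pvRep_neg "heretofore".toList "before".toList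
                    (pvRep "pursuant to".toList "according to".toList
                      (pvRep "notwithstanding".toList "despite".toList t)) c hn3]
              have hn4a : ¬ ('w' :: "hereas".toList) <+:
                  (c :: pvRep "notwithstanding".toList "despite".toList t) :=
                pv_consNoPref "notwithstanding".toList "despite".toList "hereas".toList t 'w' c
                  (by decide) (by decide) h4
              have hn4b : ¬ ('w' :: "hereas".toList) <+:
                  (c :: pvRep "pursuant to".toList "according to".toList
                        (pvRep "notwithstanding".toList "despite".toList t)) :=
                pv_consNoPref "pursuant to".toList "according to".toList "hereas".toList _ 'w' c
                  (by decide) (by decide) hn4a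
              have hn4 : ¬ ('w' :: "hereas".toList) <+:
                  (c :: pvRep "heretofore".toList "before".toList
                        (pvRep "pursuant to".toList "according to".toList
                          (pvRep "notwithstanding".toList "despite".toList t))) :=
                pv_consNoPref "heretofore".toList "before".toList "hereas".toList _ 'w' c
                  (by decide) (by decide) hn4b
              rw [pvRep_neg "whereas".toList "since".toList
                    (pvRep "heretofore".toList "before".toList
                      (pvRep "pursuant to".toList "according to".toList
                        (pvRep "notwithstanding".toList "despite".toList t))) c hn4]
              have ht : t.length ≤ n := by simp at h; omega
              rw [ih t ht]

-- ===== VERDICT (by name: the statement is the Claim_ definition above) =====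
theorem simplify_text_py_spec : Claim_equal_simplify_text_py := by
  intro text _
  show simplify_text_py text = simplify_text_py_alt text
  simp only [simplify_text_py, simplify_text_py_alt, PySem.Str.replace, String.toList_ofList]
  rw [pv_replace_eq_pvRep _ _ _ (by decide), pv_replace_eq_pvRep _ _ _ (by decide),
      pv_replace_eq_pvRep _ _ _ (by decide), pv_replace_eq_pvRep _ _ _ (by decide)]
  exact congrArg String.ofList (pv_main text.toList.length text.toList le_rfl)
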